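-- pv_equiv track=rewrite | github.com/jramaswami/Binary_Search_Python | mountain.py | solve
-- ===== SOURCE A (Python) =====
-- from collections import deque
--
-- def solve(n, lower, upper):
--     if upper == lower:
--         return []
--
--     soln = deque([upper-1, upper, upper-1])
--     k = upper - 2
--     while k >= lower and len(soln) < n:
--         soln.append(k)
--         k-=1
--
--     k = upper - 2
--     while k >= lower and len(soln) < n:
--         soln.appendleft(k)
--         k-=1
--
--     if len(soln) < n:
--         return []
--     return list(soln)
-- ===== SOURCE B (Python) =====
-- def solve(n, lower, upper):
--     if upper == lower:
--         return []
--     m = upper - 1 - lower            # flank values available per side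
--     right = max(0, min(m, n - 3))    # right side is filled first
--     left = max(0, min(m, n - 3 - right))
--     if 3 + left + right < n:
--         return []
--     return (list(range(upper - 1 - left, upper - 1))
--             + [upper - 1, upper, upper - 1]
--             + list(range(upper - 2, upper - 2 - right, -1)))
-- ===== Notes on version B (the rewrite author's own statement) =====
-- stated objective: simpler
-- what changed: Replaces A's deque and two incremental while loops by a closed-form computation of each flank's length (right side first, as A fills it) and one concatenation of two ranges around the peak.
import Mathlib
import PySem

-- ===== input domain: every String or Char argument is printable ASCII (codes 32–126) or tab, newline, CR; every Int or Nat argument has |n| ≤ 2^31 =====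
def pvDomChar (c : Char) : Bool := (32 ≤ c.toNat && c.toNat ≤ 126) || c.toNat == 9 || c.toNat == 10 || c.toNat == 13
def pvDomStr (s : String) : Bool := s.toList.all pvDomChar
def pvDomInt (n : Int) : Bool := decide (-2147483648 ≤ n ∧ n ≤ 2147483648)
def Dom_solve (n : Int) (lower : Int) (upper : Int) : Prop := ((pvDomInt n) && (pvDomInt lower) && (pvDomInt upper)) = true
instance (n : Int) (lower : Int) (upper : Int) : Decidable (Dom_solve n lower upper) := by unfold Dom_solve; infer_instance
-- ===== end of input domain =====

-- B replaces A's two deque-filling while loops by a closed-form count of each flank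
-- (right side first, as A fills it) and builds the answer from two ranges; objective: simpler.

-- ===== PORT A =====
-- first while loop: append k to the right while k >= lower and len(soln) < n
def solveLoopR (n lower : Int) (k : Int) (soln : List Int) : List Int :=
  if _h : lower ≤ k ∧ (soln.length : Int) < n then
    solveLoopR n lower (k - 1) (soln ++ [k])
  else soln
termination_by (k + 1 - lower).toNat
decreasing_by omega

-- second while loop: appendleft k while k >= lower and len(soln) < n
def solveLoopL (n lower : Int) (k : Int) (soln : List Int) : List Int :=
  if _h : lower ≤ k ∧ (soln.length : Int) < n then
    solveLoopL n lower (k - 1) (k :: soln)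
  else soln
termination_by (k + 1 - lower).toNat
decreasing_by omega

def solve (n : Int) (lower : Int) (upper : Int) : List Int :=
  if upper = lower then []
  else
    let s0 : List Int := [upper - 1, upper, upper - 1]
    let s1 := solveLoopR n lower (upper - 2) s0
    let s2 := solveLoopL n lower (upper - 2) s1
    if (s2.length : Int) < n then [] else s2

-- ===== PORT B =====
def solve_alt (n : Int) (lower : Int) (upper : Int) : List Int :=
  if upper = lower then []
  else
    let m := upper - 1 - lower
    let right := max 0 (min m (n - 3))
    let left := max 0 (min m (n - 3 - right))
    if 3 + left + right < n then []
    else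
      PySem.List.pyRange (upper - 1 - left) (upper - 1) 1
        ++ [upper - 1, upper, upper - 1]
        ++ PySem.List.pyRange (upper - 2) (upper - 2 - right) (-1)

-- ===== PRECONDITION & SPEC =====
def Spec_solve (n : Int) (lower : Int) (upper : Int) (out : List Int) : Prop := out = solve_alt n lower upper
instance (n : Int) (lower : Int) (upper : Int) (out : List Int) : Decidable (Spec_solve n lower upper out) := by unfold Spec_solve; infer_instance

-- ===== CLAIM (what is proved, stated in full; the proofs are below) =====
def Claim_equal_solve : Prop := ∀ (n : Int) (lower : Int) (upper : Int), Dom_solve n lower upper → Spec_solve n lower upper (solve n lower upper)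

-- ===== LEMMAS AND PROOFS =====

-- the right-appending loop adds the countdown range k, k-1, … of the closed-form length
lemma solveLoopR_eq (n lower : Int) :
    ∀ (fuel : Nat) (k : Int) (s : List Int), (k + 1 - lower).toNat ≤ fuel →
      solveLoopR n lower k s =
        s ++ PySem.List.pyRange k (k - max 0 (min (k + 1 - lower) (n - s.length))) (-1) := by
  intro fuel
  induction fuel with
  | zero =>
    intro k s hf
    rw [solveLoopR]
    rw [dif_neg (by omega)]
    rw [PySem.List.pyRange_neg_one_eq_nil (by omega), List.append_nil]
  | succ f ih =>
    intro k s hf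
    rw [solveLoopR]
    by_cases h : lower ≤ k ∧ (s.length : Int) < n
    · rw [dif_pos h]
      rw [ih (k - 1) (s ++ [k]) (by omega)]
      have hlen : ((s ++ [k]).length : Int) = (s.length : Int) + 1 := by
        simp
      rw [hlen]
      have ht : k - 1 - max 0 (min (k - 1 + 1 - lower) (n - ((s.length : Int) + 1)))
          = k - max 0 (min (k + 1 - lower) (n - s.length)) := by omega
      rw [ht]
      conv_rhs => rw [PySem.List.pyRange_neg_one_cons (show k - max 0 (min (k + 1 - lower) (n - (s.length : Int))) < k by omega)]
      simp
    · rw [dif_neg h]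
      have ht : max 0 (min (k + 1 - lower) (n - s.length)) = 0 := by omega
      rw [ht]
      rw [show k - 0 = k by ring,
        PySem.List.pyRange_neg_one_eq_nil (by omega), List.append_nil]

-- the left-prepending loop adds the ascending range of the closed-form length in front
lemma solveLoopL_eq (n lower : Int) :
    ∀ (fuel : Nat) (k : Int) (s : List Int), (k + 1 - lower).toNat ≤ fuel →
      solveLoopL n lower k s =
        PySem.List.pyRange (k + 1 - max 0 (min (k + 1 - lower) (n - s.length))) (k + 1) 1 ++ s := by
  intro fuel
  induction fuel with
  | zero =>
    intro k s hf
    rw [solveLoopL]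
    rw [dif_neg (by omega)]
    rw [show k + 1 - max 0 (min (k + 1 - lower) (n - s.length)) = k + 1 by omega,
      PySem.List.pyRange_one_eq_nil (by omega), List.nil_append]
  | succ f ih =>
    intro k s hf
    rw [solveLoopL]
    by_cases h : lower ≤ k ∧ (s.length : Int) < n
    · rw [dif_pos h]
      rw [ih (k - 1) (k :: s) (by omega)]
      have hlen : ((k :: s).length : Int) = (s.length : Int) + 1 := by simp
      rw [hlen]
      have ht : k - 1 + 1 - max 0 (min (k - 1 + 1 - lower) (n - ((s.length : Int) + 1)))
          = k + 1 - max 0 (min (k + 1 - lower) (n - s.length)) := by omega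
      rw [ht, show (k : Int) - 1 + 1 = k by ring]
      conv_rhs => rw [PySem.List.pyRange_one_succ_right (show k + 1 - max 0 (min (k + 1 - lower) (n - (s.length : Int))) ≤ k by omega)]
      simp
    · rw [dif_neg h]
      rw [show k + 1 - max 0 (min (k + 1 - lower) (n - s.length)) = k + 1 by omega,
        PySem.List.pyRange_one_eq_nil (by omega), List.nil_append]

-- ===== VERDICT (by name: the statement is the Claim_ definition above) =====
theorem solve_spec : Claim_equal_solve := by
  intro n lower upper _
  simp only [Spec_solve, solve, solve_alt]
  by_cases hul : upper = lower
  · simp [hul]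
  · rw [if_neg hul, if_neg hul]
    set R := max 0 (min (upper - 1 - lower) (n - 3)) with hR
    set s0 : List Int := [upper - 1, upper, upper - 1] with hs0
    have h1 : solveLoopR n lower (upper - 2) s0 =
        s0 ++ PySem.List.pyRange (upper - 2) (upper - 2 - R) (-1) := by
      rw [solveLoopR_eq n lower (upper - 2 + 1 - lower).toNat (upper - 2) s0 (le_refl _)]
      have : max 0 (min (upper - 2 + 1 - lower) (n - (s0.length : Int))) = R := by
        simp [hs0, hR]; omega
      rw [this]
    have hlen1 : ((s0 ++ PySem.List.pyRange (upper - 2) (upper - 2 - R) (-1)).length : Int)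
        = 3 + R := by
      simp [hs0, PySem.List.length_pyRange_neg_one]
      omega
    set L := max 0 (min (upper - 1 - lower) (n - 3 - R)) with hL
    have h2 : solveLoopL n lower (upper - 2) (s0 ++ PySem.List.pyRange (upper - 2) (upper - 2 - R) (-1)) =
        PySem.List.pyRange (upper - 1 - L) (upper - 1) 1 ++
          (s0 ++ PySem.List.pyRange (upper - 2) (upper - 2 - R) (-1)) := by
      rw [solveLoopL_eq n lower (upper - 2 + 1 - lower).toNat (upper - 2) _ (le_refl _)]
      rw [hlen1]
      have : upper - 2 + 1 - max 0 (min (upper - 2 + 1 - lower) (n - (3 + R))) = upper - 1 - L := by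
        simp [hL, hR]; omega
      rw [this, show upper - 2 + 1 = upper - 1 by ring]
    rw [h1, h2]
    have hlen2 : ((PySem.List.pyRange (upper - 1 - L) (upper - 1) 1 ++
        (s0 ++ PySem.List.pyRange (upper - 2) (upper - 2 - R) (-1))).length : Int) = L + (3 + R) := by
      simp [hs0, PySem.List.length_pyRange_neg_one, PySem.List.length_pyRange_one]
      omega
    rw [hlen2]
    have hcond : (L + (3 + R) < n) ↔ (3 + L + R < n) := by omega
    by_cases hc : 3 + L + R < n
    · rw [if_pos (by omega), if_pos hc]
    · rw [if_neg (by omega), if_neg hc]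
      simp [hs0]
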